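-- pv_equiv track=rewrite | github.com/danielnavarro831/Spell_Caster | scene.py | print_header
-- ===== SOURCE A (Python) =====
-- def print_header(header_text): #self, "header_text"
--     lines = []
--     bar1 = "--------------------------"
--     name_line = " " + str(header_text)
--     if len(bar1) < len(name_line):
--         while len(bar1) < len(name_line) + 3:
--             bar1 += "-"
--     if len(name_line) < len(bar1) -2:
--         while len(name_line) < len(bar1) -2:
--             name_line += " "
--     name_line += "/"
--     bar2 = "------------------------"
--     if len(bar2) < len(bar1) -2:
--         while len(bar2) < len(bar1) -2:
--             bar2 += "-"
--     lines.append(bar1)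
--     lines.append(name_line)
--     lines.append(bar2)
--     response = '\n'.join(lines)
--     return response
-- ===== SOURCE B (Python) =====
-- def print_header(header_text):
--     s = str(header_text)
--     n = 1 + len(s)
--     bar1_len = 26 if n <= 26 else n + 3
--     pad = max(0, (bar1_len - 2) - n)
--     bar2_len = max(24, bar1_len - 2)
--     return "-" * bar1_len + "\n " + s + " " * pad + "/\n" + "-" * bar2_len
-- ===== Notes on version B (the rewrite author's own statement) =====
-- stated objective: faster
-- what changed: Replaces the nested if/while one-character-at-a-time string-append padding loops with closed-form length arithmetic (26 vs n+3, max-based pad and bar widths) and single string-repetition expressions.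
import Mathlib
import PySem

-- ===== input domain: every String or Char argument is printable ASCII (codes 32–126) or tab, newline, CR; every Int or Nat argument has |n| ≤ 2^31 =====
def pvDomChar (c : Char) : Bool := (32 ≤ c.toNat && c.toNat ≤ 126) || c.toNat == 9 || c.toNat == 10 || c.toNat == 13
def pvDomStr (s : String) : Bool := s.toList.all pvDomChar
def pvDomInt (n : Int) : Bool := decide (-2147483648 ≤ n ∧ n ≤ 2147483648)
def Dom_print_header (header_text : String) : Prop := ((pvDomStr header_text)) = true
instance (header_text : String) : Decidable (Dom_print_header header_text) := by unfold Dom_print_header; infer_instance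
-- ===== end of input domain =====

-- B replaces A's nested if/while character-appending loops with closed-form length
-- arithmetic and string repetition (objective: simpler); same return value, no side effects.


-- ===== PORT A =====
-- A's "while len(s) < t: s += c" (one character appended per iteration)
def pvExtend (c : Char) (s : List Char) (t : Nat) : List Char :=
  if s.length < t then pvExtend c (s ++ [c]) t else s
termination_by t - s.length
decreasing_by simp; omega

-- literal transliteration of A; strings handled as List Char (exact: str() on a str is identity)
def print_header (header_text : String) : String :=
  let bar1 := List.replicate 26 '-'
  let name_line := ' ' :: header_text.toList          -- " " + str(header_text)
  let bar1 := if bar1.length < name_line.length then pvExtend '-' bar1 (name_line.length + 3) else bar1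
  let name_line := if name_line.length < bar1.length - 2 then pvExtend ' ' name_line (bar1.length - 2) else name_line
  let name_line := name_line ++ ['/']
  let bar2 := List.replicate 24 '-'
  let bar2 := if bar2.length < bar1.length - 2 then pvExtend '-' bar2 (bar1.length - 2) else bar2
  String.mk (bar1 ++ '\n' :: name_line ++ '\n' :: bar2)  -- '\n'.join(lines)

-- ===== PORT B =====
-- closed-form lengths; Nat subtraction in `pad` realises Source B's max(0, (bar1_len-2)-n)
def print_header_alt (header_text : String) : String :=
  let s := header_text.toList
  let n := 1 + s.length
  let bar1_len := if n ≤ 26 then 26 else n + 3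
  let pad := (bar1_len - 2) - n
  let bar2_len := max 24 (bar1_len - 2)
  String.mk (List.replicate bar1_len '-' ++ '\n' :: ' ' :: s
             ++ List.replicate pad ' ' ++ '/' :: '\n' :: List.replicate bar2_len '-')

-- ===== PRECONDITION & SPEC =====
def Spec_print_header (header_text : String) (out : String) : Prop := out = print_header_alt header_text
instance (header_text : String) (out : String) : Decidable (Spec_print_header header_text out) := by unfold Spec_print_header; infer_instance

-- ===== CLAIM (what is proved, stated in full; the proofs are below) =====
def Claim_equal_print_header : Prop := ∀ (header_text : String), Dom_print_header header_text → Spec_print_header header_text (print_header header_text)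

-- ===== LEMMAS AND PROOFS =====
theorem pvExtend_eq (c : Char) (s : List Char) (t : Nat) :
    pvExtend c s t = s ++ List.replicate (t - s.length) c := by
  by_cases h : s.length < t
  · rw [pvExtend, if_pos h, pvExtend_eq c (s ++ [c]) t]
    have : t - s.length = (t - (s.length + 1)) + 1 := by omega
    simp [this, List.replicate_succ]
  · rw [pvExtend, if_neg h]
    have : t - s.length = 0 := by omega
    simp [this]
termination_by t - s.length
decreasing_by simp; omega

-- ===== VERDICT (by name: the statement is the Claim_ definition above) =====
theorem print_header_spec : Claim_equal_print_header := by
  intro ht _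
  unfold Spec_print_header print_header print_header_alt
  dsimp only
  simp only [pvExtend_eq, List.length_cons, List.length_replicate, List.length_append]
  split_ifs with h1 h2 h3 h4 h5 h6 h7 h8 h9 h10 <;>
    simp only [List.length_append, List.length_replicate] at * <;> try omega
  · rw [show List.replicate 26 '-' ++ List.replicate (ht.toList.length + 1 + 3 - 26) '-'
          = List.replicate (1 + ht.toList.length + 3) '-' from by
        rw [← List.replicate_add]; congr 1; omega]
    rw [show List.replicate 24 '-' ++ List.replicate (26 + (ht.toList.length + 1 + 3 - 26) - 2 - 24) '-'
          = List.replicate (max 24 (1 + ht.toList.length + 3 - 2)) '-' from by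
        rw [← List.replicate_add]; congr 1; omega]
    rw [show 26 + (ht.toList.length + 1 + 3 - 26) - 2 - (ht.toList.length + 1)
          = 1 + ht.toList.length + 3 - 2 - (1 + ht.toList.length) from by omega]
    simp only [List.append_assoc, List.cons_append, List.nil_append]
  · rw [show (26 : Nat) - 2 - (ht.toList.length + 1) = 26 - 2 - (1 + ht.toList.length) from by omega,
        show (max 24 (26 - 2) : Nat) = 24 from by omega]
    simp only [List.append_assoc, List.cons_append, List.nil_append]
  · have h0 : 26 - 2 - (1 + ht.toList.length) = 0 := by omega
    rw [show (max 24 (26 - 2) : Nat) = 24 from by omega, h0]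
    simp only [List.replicate_zero, List.append_assoc, List.cons_append, List.nil_append]
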